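-- pv_equiv track=rewrite | github.com/GhostGamingMc/Vigenere-cracking-python | vigenere_cracking_german.py | finde_teiler_und_haeufigkeiten
-- ===== SOURCE A (Python) =====
-- from math import gcd
-- from collections import Counter
--
-- def finde_teiler_ohne_1_2(zahl):
--     teiler = []
--     for i in range(3, zahl + 1):
--         if zahl % i == 0:
--             teiler.append(i)
--     return teiler
--
-- def finde_teiler_und_haeufigkeiten(zahlen):
--     gemeinsamer_teiler = gcd(*zahlen)
--
--     teiler_und_haeufigkeiten = Counter()
--
--     # Iteration durch die Zahlen für die Teiler
--     for zahl in zahlen: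
--         teiler = finde_teiler_ohne_1_2(zahl)
--         teiler_und_haeufigkeiten.update(teiler)
--
--     # Ignorieren von Teiler 1 und 2
--     del teiler_und_haeufigkeiten[1]
--     del teiler_und_haeufigkeiten[2]
--
--     # Teiler und Häufigkeiten in zwei Listen aufteilen
--     teiler_liste, haeufigkeiten_liste = zip(*[(t, h) for t, h in teiler_und_haeufigkeiten.items() if h != 1])
--
--     # Sortieren der Listen nach der Häufigkeit
--     sortierte_listen = sorted(zip(haeufigkeiten_liste, teiler_liste), reverse=False)
--     haeufigkeiten_liste, teiler_liste = zip(*sortierte_listen)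
--
--     return teiler_liste, haeufigkeiten_liste
-- ===== SOURCE B (Python) =====
-- def finde_teiler_und_haeufigkeiten(zahlen):
--     # divisor-major pass: for each candidate divisor d up to max(zahlen),
--     # count in one sweep how many numbers it divides, keep counts >= 2
--     grenze = 0
--     for z in zahlen:
--         if z > grenze:
--             grenze = z
--     paare = []
--     for d in range(3, grenze + 1):
--         h = 0
--         for z in zahlen:
--             if z >= d and z % d == 0:
--                 h += 1
--         if h >= 2:
--             paare.append((h, d))
--     paare.sort()
--     haeufigkeiten_liste, teiler_liste = zip(*paare)
--     return teiler_liste, haeufigkeiten_liste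
-- ===== Notes on version B (the rewrite author's own statement) =====
-- stated objective: alternative
-- what changed: Replaces A's number-major pass (per-number 3..n divisor scan fed into a Counter, then del/filter/zip/sort) by a divisor-major pass: for each candidate divisor d from 3 to max(zahlen) one sweep counts how many numbers it divides, keeping pairs with count >= 2 directly, then sorts.
import Mathlib
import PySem

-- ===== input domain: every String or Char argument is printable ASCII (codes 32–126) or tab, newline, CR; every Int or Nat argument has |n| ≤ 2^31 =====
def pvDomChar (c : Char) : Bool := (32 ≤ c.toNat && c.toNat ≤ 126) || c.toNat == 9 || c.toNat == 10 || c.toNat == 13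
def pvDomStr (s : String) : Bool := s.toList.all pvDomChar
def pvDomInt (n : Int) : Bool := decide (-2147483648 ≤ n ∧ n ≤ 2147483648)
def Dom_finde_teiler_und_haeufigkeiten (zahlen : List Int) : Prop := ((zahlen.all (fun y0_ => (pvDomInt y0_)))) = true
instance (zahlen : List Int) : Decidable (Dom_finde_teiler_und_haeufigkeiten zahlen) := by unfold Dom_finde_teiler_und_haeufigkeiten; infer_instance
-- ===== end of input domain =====

-- B replaces A's number-major divisor scan + Counter by a divisor-major counting pass (alternative
-- algorithm of similar cost, no speed claim); equivalence is about the return value.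

-- ===== PORT A =====
def finde_teiler_ohne_1_2 (zahl : Int) : List Int :=
  (PySem.List.pyRange 3 (zahl + 1) 1).foldl
    (fun teiler i => if PySem.Int.mod zahl i == 0 then teiler ++ [i] else teiler) []

def finde_teiler_und_haeufigkeiten (zahlen : List Int) : List (List Int) :=
  -- math.gcd(*zahlen); unused by the Python as well
  let _gemeinsamer_teiler : Int := zahlen.foldl (fun g z => (Int.gcd g z : Int)) 0
  let c1 : PySem.Dict Int Int :=
    zahlen.foldl (fun c zahl =>
      (finde_teiler_ohne_1_2 zahl).foldl (fun c t => c.modify t 0 (· + 1)) c) PySem.Dict.empty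
  let c2 := (c1.erase 1).erase 2
  let pairs := c2.items.filter (fun p => p.2 != 1)
  let teiler_liste := pairs.map (·.1)
  let haeufigkeiten_liste := pairs.map (·.2)
  let sortierte_listen := PySem.List.sorted2 (haeufigkeiten_liste.zip teiler_liste) (·.1) (·.2) false
  -- zip(*…) over an empty pair list raises ValueError in Python: excluded by Pre_
  [sortierte_listen.map (·.2), sortierte_listen.map (·.1)]

-- ===== PORT B =====
def finde_teiler_und_haeufigkeiten_alt (zahlen : List Int) : List (List Int) :=
  let grenze := zahlen.foldl (fun g z => if z > g then z else g) 0
  let paare := (PySem.List.pyRange 3 (grenze + 1) 1).foldl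
    (fun paare d =>
      let h := zahlen.foldl (fun h z => if z ≥ d && PySem.Int.mod z d == 0 then h + 1 else h) (0 : Int)
      if h ≥ 2 then paare ++ [(h, d)] else paare) []
  let sortiert := PySem.List.sorted2 paare (·.1) (·.2) false
  -- zip(*…) on an empty pair list raises ValueError in Python: excluded by Pre_
  [sortiert.map (·.2), sortiert.map (·.1)]

-- ===== PRECONDITION & SPEC =====
-- Pre_ excludes exactly the inputs on which A raises: when no divisor ≥ 3 is shared by two entries
-- (counted with multiplicity) the filtered pair list is empty and unpacking the empty zip raises ValueError (B's final unpacking raises there too).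
def Pre_finde_teiler_und_haeufigkeiten (zahlen : List Int) : Prop :=
  ∃ i : Fin zahlen.length, ∃ j : Fin zahlen.length,
    i < j ∧ 3 ≤ zahlen.get i ∧ 3 ≤ zahlen.get j ∧ 3 ≤ (Int.gcd (zahlen.get i) (zahlen.get j) : Int)
instance (zahlen : List Int) : Decidable (Pre_finde_teiler_und_haeufigkeiten zahlen) := by
  unfold Pre_finde_teiler_und_haeufigkeiten; infer_instance
def pvWitness_finde_teiler_und_haeufigkeiten : List Int := [3, 3]

def Spec_finde_teiler_und_haeufigkeiten (zahlen : List Int) (out : List (List Int)) : Prop := out = finde_teiler_und_haeufigkeiten_alt zahlen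
instance (zahlen : List Int) (out : List (List Int)) : Decidable (Spec_finde_teiler_und_haeufigkeiten zahlen out) := by unfold Spec_finde_teiler_und_haeufigkeiten; infer_instance

-- ===== CLAIM (what is proved, stated in full; the proofs are below) =====
def Claim_equal_finde_teiler_und_haeufigkeiten : Prop := ∀ (zahlen : List Int), Dom_finde_teiler_und_haeufigkeiten zahlen → Pre_finde_teiler_und_haeufigkeiten zahlen → Spec_finde_teiler_und_haeufigkeiten zahlen (finde_teiler_und_haeufigkeiten zahlen)

-- ===== LEMMAS AND PROOFS =====

lemma divs_eq (z : Int) :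
    finde_teiler_ohne_1_2 z
      = (PySem.List.pyRange 3 (z + 1) 1).filter (fun i => PySem.Int.mod z i == 0) := by
  unfold finde_teiler_ohne_1_2
  simpa using PySem.List.foldl_append_if_eq_filter
    (fun i => PySem.Int.mod z i == 0) (PySem.List.pyRange 3 (z + 1) 1) []

lemma mem_divs {z d : Int} :
    d ∈ finde_teiler_ohne_1_2 z ↔ 3 ≤ d ∧ d ≤ z ∧ PySem.Int.mod z d = 0 := by
  rw [divs_eq]
  simp only [List.mem_filter, PySem.List.mem_pyRange_one, beq_iff_eq]
  omega

lemma nodup_divs (z : Int) : (finde_teiler_ohne_1_2 z).Nodup := by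
  rw [divs_eq]; exact (PySem.List.nodup_pyRange_one 3 (z + 1)).filter _

lemma count_divs (z : Int) {d : Int} (hd : 3 ≤ d) :
    (finde_teiler_ohne_1_2 z).count d
      = if d ≤ z ∧ PySem.Int.mod z d = 0 then 1 else 0 := by
  split_ifs with h
  · exact List.count_eq_one_of_mem (nodup_divs z) (mem_divs.mpr ⟨hd, h.1, h.2⟩)
  · exact List.count_eq_zero.mpr (fun hm => h ⟨(mem_divs.mp hm).2.1, (mem_divs.mp hm).2.2⟩)

-- how often divisor d is counted, as B counts it
def pvCnt (zahlen : List Int) (d : Int) : Nat :=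
  zahlen.countP (fun z => z ≥ d && PySem.Int.mod z d == 0)

lemma count_flat (zahlen : List Int) {d : Int} (hd : 3 ≤ d) :
    (zahlen.flatMap finde_teiler_ohne_1_2).count d = pvCnt zahlen d := by
  induction zahlen with
  | nil => rfl
  | cons z t ih =>
      simp only [List.flatMap_cons, List.count_append, pvCnt, List.countP_cons] at *
      rw [count_divs z hd, ih]
      simp only [ge_iff_le, Bool.and_eq_true, decide_eq_true_eq, beq_iff_eq]
      split_ifs <;> omega

lemma mem_flat {zahlen : List Int} {d : Int} :
    d ∈ zahlen.flatMap finde_teiler_ohne_1_2 ↔ 3 ≤ d ∧ 0 < pvCnt zahlen d := by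
  simp only [List.mem_flatMap, mem_divs, pvCnt, List.countP_pos_iff, ge_iff_le,
    Bool.and_eq_true, decide_eq_true_eq, beq_iff_eq]
  constructor
  · rintro ⟨z, hz, h3, hle, hm⟩; exact ⟨h3, z, hz, hle, hm⟩
  · rintro ⟨h3, z, hz, hle, hm⟩; exact ⟨z, hz, h3, hle, hm⟩

lemma le_grenze (zahlen : List Int) :
    ∀ z ∈ zahlen, z ≤ zahlen.foldl (fun g z => if z > g then z else g) 0 := by
  have h : zahlen.foldl (fun g z => if z > g then z else g) 0 = zahlen.foldl max 0 := by
    apply PySem.List.foldl_congr_mem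
    intro acc x _
    rcases max_choice acc x with h | h <;> rw [h] <;> split_ifs <;> omega
  rw [h]; exact (PySem.List.le_foldl_max zahlen 0).2

lemma sorted2_eq_sorted_lex (xs : List (Int × Int)) :
    PySem.List.sorted2 xs (·.1) (·.2) false
      = PySem.List.sorted xs (fun p => toLex p) false := by
  unfold PySem.List.sorted2 PySem.List.sorted
  simp only [Bool.false_eq_true, if_false]
  have hbef : (fun (a b : Int × Int) =>
        decide (a.1 < b.1) || (!decide (b.1 < a.1) && decide (a.2 < b.2)))
      = (fun (a b : Int × Int) => decide (toLex a < toLex b)) := by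
    funext a b
    rw [Bool.eq_iff_iff]
    simp only [Bool.or_eq_true, Bool.and_eq_true, Bool.not_eq_true', decide_eq_true_eq,
      decide_eq_false_iff_not, Prod.Lex.lt_iff, ofLex_toLex]
    omega
  rw [hbef]

lemma sorted2_eq_of_perm (xs ys : List (Int × Int)) (h : xs.Perm ys) :
    PySem.List.sorted2 xs (·.1) (·.2) false = PySem.List.sorted2 ys (·.1) (·.2) false := by
  rw [sorted2_eq_sorted_lex, sorted2_eq_sorted_lex]
  exact PySem.List.sorted_eq_sorted_of_perm _ _ _ (by exact toLex.injective) h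

theorem ports_agree (zahlen : List Int) :
    finde_teiler_und_haeufigkeiten zahlen = finde_teiler_und_haeufigkeiten_alt zahlen := by
  unfold finde_teiler_und_haeufigkeiten finde_teiler_und_haeufigkeiten_alt
  simp only []
  set L := zahlen.flatMap finde_teiler_ohne_1_2 with hL
  set g := zahlen.foldl (fun g z => if z > g then z else g) 0 with hg
  have hc1 : zahlen.foldl (fun c zahl =>
      (finde_teiler_ohne_1_2 zahl).foldl (fun c t => c.modify t 0 (· + 1)) c) PySem.Dict.empty
      = PySem.Dict.counter L := by
    rw [PySem.Dict.counter_eq_foldl, hL, List.foldl_flatMap]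
  rw [hc1]
  simp only [PySem.Dict.erase, List.filter_filter]
  rw [PySem.Dict.items_counter, List.filter_map, List.zip_map', List.map_map]
  have hinner : ∀ d : Int,
      zahlen.foldl (fun h z => if z ≥ d && PySem.Int.mod z d == 0 then h + 1 else h) (0 : Int)
        = (pvCnt zahlen d : Int) := by
    intro d
    rw [PySem.List.foldl_count_if (fun z => z ≥ d && PySem.Int.mod z d == 0) zahlen 0]
    simp [pvCnt]
  simp only [hinner]
  rw [PySem.List.foldl_append_ite (p := fun d : Int => ((pvCnt zahlen d : Int) ≥ 2))
        (f := fun d : Int => ((pvCnt zahlen d : Int), d))]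
  simp only [List.nil_append, Function.comp_def]
  have hmem3 : ∀ x ∈ PySem.Set.ofList L, 3 ≤ x := by
    intro x hx
    have := (PySem.Set.mem_ofList L x).mp hx
    rw [hL] at this
    exact (mem_flat.mp this).1
  have h1 : List.map (fun x => ((List.count x L : Int), x))
        (List.filter (fun x => (List.count x L : Int) != 1 && (!x == 2 && !x == 1))
          (PySem.Set.ofList L))
      = List.map (fun x => ((pvCnt zahlen x : Int), x))
        (List.filter (fun x => (List.count x L : Int) != 1 && (!x == 2 && !x == 1))
          (PySem.Set.ofList L)) := by
    apply List.map_congr_left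
    intro x hx
    rw [hL, count_flat zahlen (hmem3 x (List.mem_filter.mp hx).1)]
  rw [h1]
  have hperm : (List.filter (fun x => (List.count x L : Int) != 1 && (!x == 2 && !x == 1))
        (PySem.Set.ofList L)).Perm
      (List.filter (fun x => decide ((pvCnt zahlen x : Int) ≥ 2)) (PySem.List.pyRange 3 (g + 1))) := by
    rw [List.perm_ext_iff_of_nodup ((PySem.Set.nodup_ofList L).filter _)
      ((PySem.List.nodup_pyRange_one 3 (g + 1)).filter _)]
    intro d
    simp only [List.mem_filter, PySem.List.mem_pyRange_one, Bool.and_eq_true,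
      Bool.not_eq_true', beq_eq_false_iff_ne, bne_iff_ne, decide_eq_true_eq, ge_iff_le]
    constructor
    · rintro ⟨hmem, hne1, -, -⟩
      have h3d : 3 ≤ d := hmem3 d hmem
      have hmem' := (PySem.Set.mem_ofList L d).mp hmem
      rw [hL] at hmem'
      have hpos : 0 < pvCnt zahlen d := (mem_flat.mp hmem').2
      rw [hL, count_flat zahlen h3d] at hne1
      have hcnt : 2 ≤ pvCnt zahlen d := by omega
      obtain ⟨z, hz, hp⟩ := List.countP_pos_iff.mp hpos
      simp only [ge_iff_le, Bool.and_eq_true, decide_eq_true_eq, beq_iff_eq] at hp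
      have hzg := le_grenze zahlen z hz
      rw [← hg] at hzg
      exact ⟨⟨h3d, by omega⟩, by exact_mod_cast hcnt⟩
    · rintro ⟨⟨h3d, -⟩, hcnt⟩
      have hcnt' : 2 ≤ pvCnt zahlen d := by exact_mod_cast hcnt
      have hmem : d ∈ PySem.Set.ofList L := by
        rw [hL]
        exact (PySem.Set.mem_ofList _ d).mpr (mem_flat.mpr ⟨h3d, by omega⟩)
      refine ⟨hmem, ?_, by omega, by omega⟩
      rw [hL, count_flat zahlen h3d]
      omega
  rw [sorted2_eq_of_perm _ _ (hperm.map _)]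
-- ===== VERDICT (by name: the statement is the Claim_ definition above) =====
theorem finde_teiler_und_haeufigkeiten_spec : Claim_equal_finde_teiler_und_haeufigkeiten := by
  intro zahlen _ _
  unfold Spec_finde_teiler_und_haeufigkeiten
  exact ports_agree zahlen
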